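-- pv_equiv track=rewrite | github.com/haibindev/repo-scan | scripts/backfill_dates.py | patch_detail_report
-- ===== SOURCE A (Python) =====
-- def patch_detail_report(md_text, oldest, newest):
--     """在 detail 报告的 Section 1 表格中插入日期行。返回修改后的文本。"""
--     if not oldest and not newest:
--         return md_text
--
--     # 找到 "Project Code Ratio" 行，在其后插入日期行
--     lines = md_text.split('\n')
--     new_lines = []
--     inserted = False
--     for line in lines:
--         new_lines.append(line)
--         if not inserted and 'Project Code Ratio' in line and '|' in line:
--             if oldest:
--                 new_lines.append(f'| Oldest Source File | {oldest} |')
--             if newest: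
--                 new_lines.append(f'| Newest Source File | {newest} |')
--             inserted = True
--
--     if not inserted:
--         # 备用：在 "## 2." 之前插入
--         new_lines = []
--         for line in lines:
--             if not inserted and line.startswith('## 2.'):
--                 if oldest:
--                     new_lines.append(f'| Oldest Source File | {oldest} |')
--                 if newest:
--                     new_lines.append(f'| Newest Source File | {newest} |')
--                 new_lines.append('')
--                 inserted = True
--             new_lines.append(line)
--
--     return '\n'.join(new_lines)
-- ===== SOURCE B (Python) =====
-- def patch_detail_report(md_text, oldest, newest):
--     """在 detail 报告的 Section 1 表格中插入日期行。返回修改后的文本。"""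
--     if not oldest and not newest:
--         return md_text
--
--     lines = md_text.split('\n')
--     rows = []
--     if oldest:
--         rows.append(f'| Oldest Source File | {oldest} |')
--     if newest:
--         rows.append(f'| Newest Source File | {newest} |')
--
--     # first line of the Section 1 table header
--     idx = next((i for i, line in enumerate(lines)
--                 if 'Project Code Ratio' in line and '|' in line), None)
--     if idx is not None:
--         return '\n'.join(lines[:idx + 1] + rows + lines[idx + 1:])
--
--     # fallback: splice before the first "## 2." heading
--     idx = next((i for i, line in enumerate(lines)
--                 if line.startswith('## 2.')), None)
--     if idx is not None:
--         return '\n'.join(lines[:idx] + rows + [''] + lines[idx:])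
--     return '\n'.join(lines)
-- ===== Notes on version B (the rewrite author's own statement) =====
-- stated objective: simpler
-- what changed: B replaces A's two flag-carrying accumulator loops by computing an insertion index with a single linear search (next/enumerate) and splicing the rows in with list slicing.
import Mathlib
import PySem

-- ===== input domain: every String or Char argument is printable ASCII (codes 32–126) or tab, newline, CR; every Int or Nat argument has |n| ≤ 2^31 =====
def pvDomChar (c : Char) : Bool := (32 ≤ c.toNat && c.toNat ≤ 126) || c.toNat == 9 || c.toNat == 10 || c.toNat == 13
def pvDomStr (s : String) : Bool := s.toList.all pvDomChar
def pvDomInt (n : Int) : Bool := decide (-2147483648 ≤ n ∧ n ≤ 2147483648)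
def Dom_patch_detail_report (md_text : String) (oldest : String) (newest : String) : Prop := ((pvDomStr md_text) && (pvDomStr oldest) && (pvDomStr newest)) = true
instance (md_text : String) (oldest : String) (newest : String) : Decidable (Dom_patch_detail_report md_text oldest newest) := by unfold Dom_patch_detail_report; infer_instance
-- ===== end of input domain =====

-- B computes the insertion index by a single linear search and splices the rows in,
-- instead of A's two flag-carrying accumulator loops (objective: simpler decomposition).

-- shared f-string formatting and the conditional date rows (identical literal text in A and B)
def pvRows (oldest newest : String) : List String :=
  (if oldest ≠ "" then [PySem.Str.join "" ["| Oldest Source File | ", oldest, " |"]] else []) ++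
  (if newest ≠ "" then [PySem.Str.join "" ["| Newest Source File | ", newest, " |"]] else [])

def pvCondTable (line : String) : Bool :=
  PySem.Str.isIn "Project Code Ratio" line && PySem.Str.isIn "|" line

def pvCondHead (line : String) : Bool :=
  PySem.Str.startswith line "## 2."

-- ===== PORT A =====
-- the first loop: new_lines.append(line); if not inserted and cond: append rows; inserted = True
def pvStepA (oldest newest : String) (st : List String × Bool) (line : String) : List String × Bool :=
  let nl := st.1 ++ [line]
  if !st.2 && pvCondTable line then (nl ++ pvRows oldest newest, true) else (nl, st.2)

-- the fallback loop: if not inserted and line.startswith('## 2.'): rows, '' ; then append line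
def pvStepFB (oldest newest : String) (st : List String × Bool) (line : String) : List String × Bool :=
  if !st.2 && pvCondHead line then (st.1 ++ pvRows oldest newest ++ [""] ++ [line], true)
  else (st.1 ++ [line], st.2)

def patch_detail_report (md_text : String) (oldest : String) (newest : String) : String :=
  if oldest = "" ∧ newest = "" then md_text
  else
    let lines := (PySem.Str.split? md_text "\n").getD []
    let r := lines.foldl (pvStepA oldest newest) ([], false)
    if r.2 then PySem.Str.join "\n" r.1
    else PySem.Str.join "\n" (lines.foldl (pvStepFB oldest newest) ([], false)).1

-- ===== PORT B =====
def patch_detail_report_alt (md_text : String) (oldest : String) (newest : String) : String :=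
  if oldest = "" ∧ newest = "" then md_text
  else
    let lines := (PySem.Str.split? md_text "\n").getD []
    let rows := pvRows oldest newest
    match lines.findIdx? pvCondTable with
    | some i => PySem.Str.join "\n" (lines.take (i + 1) ++ rows ++ lines.drop (i + 1))
    | none =>
      match lines.findIdx? pvCondHead with
      | some j => PySem.Str.join "\n" (lines.take j ++ rows ++ [""] ++ lines.drop j)
      | none => PySem.Str.join "\n" lines

-- ===== PRECONDITION & SPEC =====
def Spec_patch_detail_report (md_text : String) (oldest : String) (newest : String) (out : String) : Prop := out = patch_detail_report_alt md_text oldest newest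
instance (md_text : String) (oldest : String) (newest : String) (out : String) : Decidable (Spec_patch_detail_report md_text oldest newest out) := by unfold Spec_patch_detail_report; infer_instance

-- ===== CLAIM (what is proved, stated in full; the proofs are below) =====
def Claim_equal_patch_detail_report : Prop := ∀ (md_text : String) (oldest : String) (newest : String), Dom_patch_detail_report md_text oldest newest → Spec_patch_detail_report md_text oldest newest (patch_detail_report md_text oldest newest)

-- ===== LEMMAS AND PROOFS =====

theorem foldlA_true (o n : String) (ls : List String) (acc : List String) :
    ls.foldl (pvStepA o n) (acc, true) = (acc ++ ls, true) := by
  induction ls generalizing acc with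
  | nil => simp
  | cons a t ih => simp [pvStepA, ih]

theorem foldlA_false (o n : String) (ls : List String) (acc : List String) :
    ls.foldl (pvStepA o n) (acc, false) =
      match ls.findIdx? pvCondTable with
      | some i => (acc ++ ls.take (i + 1) ++ pvRows o n ++ ls.drop (i + 1), true)
      | none => (acc ++ ls, false) := by
  induction ls generalizing acc with
  | nil => simp
  | cons a t ih =>
    by_cases h : pvCondTable a = true
    · simp [pvStepA, h, List.findIdx?_cons, foldlA_true]
    · have hs : pvStepA o n (acc, false) a = (acc ++ [a], false) := by simp [pvStepA, h]
      rw [List.foldl_cons, hs, ih]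
      simp [List.findIdx?_cons, h]
      cases hf : List.findIdx? pvCondTable t <;> simp

theorem foldlFB_true (o n : String) (ls : List String) (acc : List String) :
    ls.foldl (pvStepFB o n) (acc, true) = (acc ++ ls, true) := by
  induction ls generalizing acc with
  | nil => simp
  | cons a t ih => simp [pvStepFB, ih]

theorem foldlFB_false (o n : String) (ls : List String) (acc : List String) :
    ls.foldl (pvStepFB o n) (acc, false) =
      match ls.findIdx? pvCondHead with
      | some j => (acc ++ ls.take j ++ pvRows o n ++ [""] ++ ls.drop j, true)
      | none => (acc ++ ls, false) := by
  induction ls generalizing acc with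
  | nil => simp
  | cons a t ih =>
    by_cases h : pvCondHead a = true
    · simp [pvStepFB, h, List.findIdx?_cons, foldlFB_true]
    · have hs : pvStepFB o n (acc, false) a = (acc ++ [a], false) := by simp [pvStepFB, h]
      rw [List.foldl_cons, hs, ih]
      simp [List.findIdx?_cons, h]
      cases hf : List.findIdx? pvCondHead t <;> simp

-- ===== VERDICT (by name: the statement is the Claim_ definition above) =====
theorem patch_detail_report_spec : Claim_equal_patch_detail_report := by
  intro md o n _
  unfold Spec_patch_detail_report patch_detail_report patch_detail_report_alt
  by_cases h0 : o = "" ∧ n = ""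
  · simp [h0]
  · simp only [if_neg h0]
    rw [foldlA_false]
    cases h1 : List.findIdx? pvCondTable ((PySem.Str.split? md "\n").getD []) with
    | some i => simp
    | none =>
      simp only
      rw [foldlFB_false]
      cases h2 : List.findIdx? pvCondHead ((PySem.Str.split? md "\n").getD []) with
      | some j => simp
      | none => simp
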